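-- pv_equiv track=rewrite | github.com/wilmurillo-ai/Design-Assistant | .skills/openclaw-skills/skills/vrtalex/bitrix24-apiskill/scripts/bitrix24_client.py | parse_pack_list
-- ===== SOURCE A (Python) =====
-- from typing import Any, Callable, Dict, Iterator, List, Optional, Sequence, Set, Tuple
--
-- PACK_METHOD_ALLOWLIST: Dict[str, Tuple[str, ...]] = {
--     "core": (
--         "batch",
--         "user.*",
--         "department.*",
--         "crm.*",
--         "tasks.task.*",
--         "task.*",
--         "event.*",
--     ),
--     "comms": (
--         "im.*",
--         "imbot.*",
--         "imopenlines.*",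
--         "imconnector.*",
--         "messageservice.*",
--         "mailservice.*",
--         "telephony.*",
--     ),
--     "automation": (
--         "bizproc.*",
--         "crm.automation.*",
--         "lists.*",
--     ),
--     "collab": (
--         "sonet_group.*",
--         "socialnetwork.*",
--         "log.*",
--         "calendar.*",
--         "vote.*",
--     ),
--     "content": (
--         "disk.*",
--         "file.*",
--         "files.*",
--         "documentgenerator.*",
--     ),
--     "boards": (
--         "tasks.api.scrum.*",
--         "tasks.scrum.*",
--     ),
--     "commerce": (
--         "sale.*",
--         "catalog.*",
--     ),
--     "services": (
--         "booking.*",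
--         "calendar.*",
--         "timeman.*",
--     ),
--     "platform": (
--         "entity.*",
--         "biconnector.*",
--         "ai.*",
--     ),
--     "sites": (
--         "landing.*",
--     ),
--     "compliance": (
--         "userconsent.*",
--         "sign.*",
--     ),
--     "diagnostics": (
--         "method.get",
--         "methods",
--         "events",
--         "feature.get",
--         "scope",
--         "server.time",
--     ),
-- }
--
-- DEFAULT_PACKS: Tuple[str, ...] = ("core",)
--
-- def parse_pack_list(raw: Optional[str]) -> List[str]:
--     if raw is None or not raw.strip():
--         return list(DEFAULT_PACKS)
--     pack_names = [name.strip().lower() for name in raw.split(",") if name.strip()]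
--     if pack_names == ["none"]:
--         return []
--
--     deduped: List[str] = []
--     seen: Set[str] = set()
--     for name in pack_names:
--         if name not in PACK_METHOD_ALLOWLIST:
--             available = ", ".join(sorted(PACK_METHOD_ALLOWLIST.keys()))
--             raise ValueError(f"unknown pack '{name}', available packs: {available}")
--         if name in seen:
--             continue
--         seen.add(name)
--         deduped.append(name)
--     return deduped
-- ===== SOURCE B (Python) =====
-- PACK_METHOD_ALLOWLIST = {
--     "core": ("batch", "user.*", "department.*", "crm.*", "tasks.task.*", "task.*", "event.*"),
--     "comms": ("im.*", "imbot.*", "imopenlines.*", "imconnector.*", "messageservice.*", "mailservice.*", "telephony.*"),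
--     "automation": ("bizproc.*", "crm.automation.*", "lists.*"),
--     "collab": ("sonet_group.*", "socialnetwork.*", "log.*", "calendar.*", "vote.*"),
--     "content": ("disk.*", "file.*", "files.*", "documentgenerator.*"),
--     "boards": ("tasks.api.scrum.*", "tasks.scrum.*"),
--     "commerce": ("sale.*", "catalog.*"),
--     "services": ("booking.*", "calendar.*", "timeman.*"),
--     "platform": ("entity.*", "biconnector.*", "ai.*"),
--     "sites": ("landing.*",),
--     "compliance": ("userconsent.*", "sign.*"),
--     "diagnostics": ("method.get", "methods", "events", "feature.get", "scope", "server.time"),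
-- }
--
-- DEFAULT_PACKS = ("core",)
--
--
-- def _dedup(names):
--     # keep the head, drop all its later copies, recurse on the rest
--     if not names:
--         return []
--     head = names[0]
--     return [head] + _dedup([n for n in names[1:] if n != head])
--
--
-- def parse_pack_list(raw):
--     if raw is None or not raw.strip():
--         return list(DEFAULT_PACKS)
--     pack_names = [name.strip().lower() for name in raw.split(",") if name.strip()]
--     if pack_names == ["none"]:
--         return []
--     bad = next((n for n in pack_names if n not in PACK_METHOD_ALLOWLIST), None)
--     if bad is not None:
--         available = ", ".join(sorted(PACK_METHOD_ALLOWLIST.keys()))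
--         raise ValueError(f"unknown pack '{bad}', available packs: {available}")
--     return _dedup(pack_names)
-- ===== Notes on version B (the rewrite author's own statement) =====
-- stated objective: alternative
-- what changed: A's single fused loop validating and deduping with a (deduped list, seen set) accumulator becomes a separate search for the first unknown name followed by a recursive head-and-filter dedup ([head] + dedup of the tail with head's copies filtered out), with no seen set or accumulator state.
import Mathlib
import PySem

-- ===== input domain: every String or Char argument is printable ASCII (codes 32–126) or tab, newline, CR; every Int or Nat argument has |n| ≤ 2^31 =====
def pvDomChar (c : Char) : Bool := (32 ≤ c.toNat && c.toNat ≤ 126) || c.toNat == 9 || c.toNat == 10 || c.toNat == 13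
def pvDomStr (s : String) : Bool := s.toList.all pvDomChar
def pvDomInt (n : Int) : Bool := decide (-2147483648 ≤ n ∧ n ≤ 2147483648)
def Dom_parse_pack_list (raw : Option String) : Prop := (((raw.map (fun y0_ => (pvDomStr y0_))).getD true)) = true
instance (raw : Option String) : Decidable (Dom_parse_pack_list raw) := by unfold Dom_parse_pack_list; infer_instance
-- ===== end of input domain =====

-- B replaces A's fused validate-and-dedup loop (deduped list + seen set) with a search for the
-- first unknown name followed by a recursive head-and-filter dedup; alternative decomposition, no speed claim.
-- A raises ValueError on unknown pack names; those inputs are outside Pre_ (B raises there too).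

-- keys of PACK_METHOD_ALLOWLIST, in insertion order (only membership in the keys matters to both programs)
def packKeys : List String :=
  ["core", "comms", "automation", "collab", "content", "boards", "commerce",
   "services", "platform", "sites", "compliance", "diagnostics"]

-- shared parsing line: [name.strip().lower() for name in raw.split(",") if name.strip()]
def parsedNames (s : String) : List String :=
  (((PySem.Str.split? s ",").getD []).filter (fun name => decide (PySem.Str.strip name ≠ ""))).map
    (fun name => PySem.Str.lower (PySem.Str.strip name))

-- ===== PORT A =====
-- A's loop over pack_names carrying (deduped, seen); 'none' models the ValueError on an unknown name
def aDedupLoop : List String → List String → PySem.Set String → Option (List String)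
  | [], deduped, _ => some deduped
  | name :: rest, deduped, seen =>
    if ¬ packKeys.contains name then none  -- raise ValueError (outside Pre_)
    else if PySem.Set.contains seen name then aDedupLoop rest deduped seen
    else aDedupLoop rest (deduped ++ [name]) (PySem.Set.add seen name)

def parse_pack_list (raw : Option String) : List String :=
  match raw with
  | none => ["core"]
  | some s =>
    if PySem.Str.strip s = "" then ["core"]
    else
      let pack_names := parsedNames s
      if pack_names = ["none"] then []
      else (aDedupLoop pack_names [] PySem.Set.empty).getD []  -- none only outside Pre_

-- ===== PORT B =====
-- B's recursive dedup: keep the head, filter its copies out of the tail, recurse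
def fdDedup : List String → List String
  | [] => []
  | x :: xs => x :: fdDedup (xs.filter (fun n => n ≠ x))
termination_by l => l.length
decreasing_by
  simp only [List.length_cons, List.unattach, List.length_map]
  exact Nat.lt_succ_of_le (le_trans (List.length_filter_le _ _) (by simp))

def parse_pack_list_alt (raw : Option String) : List String :=
  match raw with
  | none => ["core"]
  | some s =>
    if PySem.Str.strip s = "" then ["core"]
    else
      let pack_names := parsedNames s
      if pack_names = ["none"] then []
      else
        match pack_names.find? (fun n => ¬ packKeys.contains n) with
        | some _ => []  -- raise ValueError (outside Pre_)
        | none => fdDedup pack_names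

-- ===== PRECONDITION & SPEC =====
-- Pre_ excludes exactly the inputs on which A raises ValueError: some parsed pack name is
-- not an allowlist key (and the parsed list is not exactly ["none"]).
def Pre_parse_pack_list (raw : Option String) : Prop :=
  match raw with
  | none => True
  | some s =>
    PySem.Str.strip s = "" ∨ parsedNames s = ["none"] ∨
      ∀ n ∈ parsedNames s, packKeys.contains n = true

instance (raw : Option String) : Decidable (Pre_parse_pack_list raw) := by
  unfold Pre_parse_pack_list; cases raw <;> exact inferInstance

def pvWitness_parse_pack_list : Option String := some "core, Comms,core"

def Spec_parse_pack_list (raw : Option String) (out : List String) : Prop := out = parse_pack_list_alt raw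
instance (raw : Option String) (out : List String) : Decidable (Spec_parse_pack_list raw out) := by unfold Spec_parse_pack_list; infer_instance

-- ===== CLAIM (what is proved, stated in full; the proofs are below) =====
def Claim_equal_parse_pack_list : Prop := ∀ (raw : Option String), Dom_parse_pack_list raw → Pre_parse_pack_list raw → Spec_parse_pack_list raw (parse_pack_list raw)

-- ===== LEMMAS AND PROOFS =====

-- A's fused loop, when seen and deduped coincide and every name is allowlisted, extends deduped
-- with B's head-and-filter dedup of the not-yet-seen names.
lemma fdDedup_nil : fdDedup [] = [] := by unfold fdDedup; rfl

lemma fdDedup_cons (x : String) (xs : List String) :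
    fdDedup (x :: xs) = x :: fdDedup (xs.filter (fun n => n ≠ x)) := by
  conv_lhs => unfold fdDedup

lemma aDedupLoop_eq (names : List String) : ∀ (ded : List String),
    (∀ n ∈ names, packKeys.contains n = true) →
    aDedupLoop names ded ded =
      some (ded ++ fdDedup (names.filter (fun n => ¬ ded.contains n))) := by
  induction names with
  | nil => intro ded _; simp [aDedupLoop, fdDedup_nil]
  | cons x rest ih =>
    intro ded h
    have hx : packKeys.contains x = true := h x (by simp)
    have hrest : ∀ m ∈ rest, packKeys.contains m = true := fun m hm => h m (by simp [hm])
    by_cases hc : PySem.Set.contains ded x = true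
    · have hm : x ∈ ded := by simpa [PySem.Set.contains] using hc
      rw [show aDedupLoop (x :: rest) ded ded = aDedupLoop rest ded ded by
        simp [aDedupLoop, show x ∈ packKeys by simpa using hx, hm]]
      rw [ih ded hrest, List.filter_cons_of_neg (by simp [hm])]
    · have hm : x ∉ ded := by simpa [PySem.Set.contains] using hc
      have hadd : PySem.Set.add ded x = ded ++ [x] := by
        simp [PySem.Set.add, PySem.Set.contains, hm]
      rw [show aDedupLoop (x :: rest) ded ded = aDedupLoop rest (ded ++ [x]) (ded ++ [x]) by
        simp [aDedupLoop, show x ∈ packKeys by simpa using hx, hm, hadd]]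
      rw [ih (ded ++ [x]) hrest]
      have hfilt : rest.filter (fun n => ¬ (ded ++ [x]).contains n) =
          (rest.filter (fun n => ¬ ded.contains n)).filter (fun n => n ≠ x) := by
        rw [List.filter_filter]
        apply List.filter_congr
        intro n _
        by_cases hnx : n = x <;> by_cases hnd : n ∈ ded <;> simp [hnx, hnd]
      rw [hfilt, List.filter_cons_of_pos (by simp [hm]), fdDedup_cons]
      simp

-- ===== VERDICT (by name: the statement is the Claim_ definition above) =====
theorem parse_pack_list_spec : Claim_equal_parse_pack_list := by
  intro raw _ hpre
  unfold Spec_parse_pack_list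
  match raw with
  | none => rfl
  | some s =>
    by_cases hstrip : PySem.Str.strip s = ""
    · simp [parse_pack_list, parse_pack_list_alt, hstrip]
    · by_cases hnone : parsedNames s = ["none"]
      · simp [parse_pack_list, parse_pack_list_alt, hstrip, hnone]
      · have hall : ∀ n ∈ parsedNames s, packKeys.contains n = true := by
          unfold Pre_parse_pack_list at hpre
          rcases hpre with h | h | h
          · exact absurd h hstrip
          · exact absurd h hnone
          · exact h
        have hfind : (parsedNames s).find? (fun n => ¬ packKeys.contains n) = none := by
          rw [List.find?_eq_none]
          intro n hn
          simpa using hall n hn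
        simp only [parse_pack_list, parse_pack_list_alt, hstrip, hnone, PySem.Set.empty, hfind]
        rw [aDedupLoop_eq (parsedNames s) [] hall]
        simp
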